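-- pv_equiv track=rewrite | github.com/yannickloth/W33-Theory | tools/isotropic_2spaces.py | get_2space_lines
-- ===== SOURCE A (Python) =====
-- GF3 = [0, 1, 2]
--
-- def normalize(p):
--     """Canonical representative of line through p"""
--     for i, x in enumerate(p):
--         if x != 0:
--             inv = pow(x, -1, 3)
--             return tuple((c * inv) % 3 for c in p)
--     return p
--
-- def get_2space_lines(u, v):
--     """Get the 4 lines in the 2-space spanned by u and v"""
--     space_lines = set()
--     for a in GF3:
--         for b in GF3:
--             if a == 0 and b == 0:
--                 continue
--             # point a*u + b*v
--             p = tuple((a * u[i] + b * v[i]) % 3 for i in range(4))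
--             space_lines.add(normalize(p))
--     return frozenset(space_lines)
-- ===== SOURCE B (Python) =====
-- def _canon(p):
--     """Canonical representative of the line through p (p already reduced mod 3):
--     scale so the first nonzero coordinate is 1 (doubling mod 3 if it is 2)."""
--     for x in p:
--         if x != 0:
--             if x == 2:
--                 return tuple((2 * c) % 3 for c in p)
--             return p
--     return p
--
-- def get_2space_lines(u, v):
--     """Get the 4 lines in the 2-space spanned by u and v"""
--     lines = []
--     # one representative (a, b) per projective class [a:b] over GF(3)
--     for a, b in ((0, 1), (1, 0), (1, 1), (1, 2)):
--         q = _canon(tuple((a * u[i] + b * v[i]) % 3 for i in range(4)))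
--         if q not in lines:
--             lines.append(q)
--     return frozenset(lines)
-- ===== Notes on version B (the rewrite author's own statement) =====
-- stated objective: simpler
-- what changed: B drops the 3x3 (a,b) grid plus skip-and-dedup: it enumerates one representative (a,b) per projective class of the line -- (0,1),(1,0),(1,1),(1,2) -- normalizes each of the four points directly (doubling mod 3 when the leading coordinate is 2, instead of computing pow(x,-1,3)), and collects them.
import Mathlib
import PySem

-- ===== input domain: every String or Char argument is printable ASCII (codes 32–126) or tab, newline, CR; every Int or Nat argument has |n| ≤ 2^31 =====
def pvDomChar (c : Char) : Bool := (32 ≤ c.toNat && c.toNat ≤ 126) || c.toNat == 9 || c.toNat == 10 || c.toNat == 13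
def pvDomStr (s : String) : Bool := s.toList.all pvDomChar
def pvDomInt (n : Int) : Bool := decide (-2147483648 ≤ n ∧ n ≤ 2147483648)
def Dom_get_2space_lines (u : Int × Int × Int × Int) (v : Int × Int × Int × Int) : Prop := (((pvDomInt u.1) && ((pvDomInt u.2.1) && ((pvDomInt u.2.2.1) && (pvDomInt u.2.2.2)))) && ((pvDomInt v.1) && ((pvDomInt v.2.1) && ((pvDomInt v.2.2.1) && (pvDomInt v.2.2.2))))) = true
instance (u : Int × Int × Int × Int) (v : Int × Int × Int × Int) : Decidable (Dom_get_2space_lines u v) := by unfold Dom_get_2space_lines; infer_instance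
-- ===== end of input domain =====

-- B replaces the 3x3 (a,b) grid over GF(3) by the four projective representatives
-- (0,1),(1,0),(1,1),(1,2) of the lines of the spanned 2-space (objective: simpler).


-- ===== PORT A =====
-- pow(x, -1, 3): inverse mod 3; exact for the arguments normalize passes it (x % 3 ≠ 0,
-- since A only calls normalize on mod-3-reduced points and skips x = 0)
def pvInv3 (x : Int) : Int := if PySem.Int.mod x 3 = 1 then 1 else 2

-- tuple((c * inv) % 3 for c in p)
def pvScale (p : Int × Int × Int × Int) (inv : Int) : Int × Int × Int × Int :=
  (PySem.Int.mod (p.1 * inv) 3, PySem.Int.mod (p.2.1 * inv) 3,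
   PySem.Int.mod (p.2.2.1 * inv) 3, PySem.Int.mod (p.2.2.2 * inv) 3)

-- normalize: first nonzero coordinate x, scale by pow(x,-1,3); else p
def pvNormalize (p : Int × Int × Int × Int) : Int × Int × Int × Int :=
  if p.1 ≠ 0 then pvScale p (pvInv3 p.1)
  else if p.2.1 ≠ 0 then pvScale p (pvInv3 p.2.1)
  else if p.2.2.1 ≠ 0 then pvScale p (pvInv3 p.2.2.1)
  else if p.2.2.2 ≠ 0 then pvScale p (pvInv3 p.2.2.2)
  else p

-- tuple((a * u[i] + b * v[i]) % 3 for i in range(4))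
def pvPoint (u v : Int × Int × Int × Int) (a b : Int) : Int × Int × Int × Int :=
  (PySem.Int.mod (a * u.1 + b * v.1) 3, PySem.Int.mod (a * u.2.1 + b * v.2.1) 3,
   PySem.Int.mod (a * u.2.2.1 + b * v.2.2.1) 3, PySem.Int.mod (a * u.2.2.2 + b * v.2.2.2) 3)

def pvGF3 : List Int := [0, 1, 2]

def get_2space_lines (u : Int × Int × Int × Int) (v : Int × Int × Int × Int) : List (Int × Int × Int × Int) :=
  pvGF3.foldl (fun s a =>
    pvGF3.foldl (fun s b =>
      if a = 0 ∧ b = 0 then s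
      else PySem.Set.add s (pvNormalize (pvPoint u v a b))) s)
    PySem.Set.empty

-- ===== PORT B =====
-- tuple((2 * c) % 3 for c in p)
def pvDouble (p : Int × Int × Int × Int) : Int × Int × Int × Int :=
  (PySem.Int.mod (2 * p.1) 3, PySem.Int.mod (2 * p.2.1) 3,
   PySem.Int.mod (2 * p.2.2.1) 3, PySem.Int.mod (2 * p.2.2.2) 3)

-- _canon: first nonzero coordinate; double mod 3 if it is 2, else keep p
def pvCanon (p : Int × Int × Int × Int) : Int × Int × Int × Int :=
  if p.1 ≠ 0 then (if p.1 = 2 then pvDouble p else p)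
  else if p.2.1 ≠ 0 then (if p.2.1 = 2 then pvDouble p else p)
  else if p.2.2.1 ≠ 0 then (if p.2.2.1 = 2 then pvDouble p else p)
  else if p.2.2.2 ≠ 0 then (if p.2.2.2 = 2 then pvDouble p else p)
  else p

def get_2space_lines_alt (u : Int × Int × Int × Int) (v : Int × Int × Int × Int) : List (Int × Int × Int × Int) :=
  ([((0:Int),(1:Int)), (1,0), (1,1), (1,2)]).foldl (fun lines ab =>
    let q := pvCanon (pvPoint u v ab.1 ab.2)
    if q ∈ lines then lines else lines ++ [q]) []

-- ===== PRECONDITION & SPEC =====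
def Spec_get_2space_lines (u : Int × Int × Int × Int) (v : Int × Int × Int × Int) (out : List (Int × Int × Int × Int)) : Prop := out = get_2space_lines_alt u v
instance (u : Int × Int × Int × Int) (v : Int × Int × Int × Int) (out : List (Int × Int × Int × Int)) : Decidable (Spec_get_2space_lines u v out) := by unfold Spec_get_2space_lines; infer_instance

-- ===== CLAIM (what is proved, stated in full; the proofs are below) =====
def Claim_equal_get_2space_lines : Prop := ∀ (u : Int × Int × Int × Int) (v : Int × Int × Int × Int), Dom_get_2space_lines u v → Spec_get_2space_lines u v (get_2space_lines u v)

-- ===== LEMMAS AND PROOFS =====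

-- scalar facts about mod 3
theorem pv_md_bounds (x : Int) : 0 ≤ PySem.Int.mod x 3 ∧ PySem.Int.mod x 3 < 3 := by
  rw [PySem.Int.mod_eq_emod_of_pos (by norm_num)]; omega

theorem pv_md_twice (x : Int) : PySem.Int.mod (2 * PySem.Int.mod x 3) 3 = PySem.Int.mod (2 * x) 3 := by
  rw [PySem.Int.mod_eq_emod_of_pos (by norm_num), PySem.Int.mod_eq_emod_of_pos (by norm_num),
      PySem.Int.mod_eq_emod_of_pos (by norm_num)]
  omega

-- on mod-3-reduced points, A's normalize and B's _canon agree
theorem pv_canon_eq_normalize (p : Int × Int × Int × Int)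
    (h1 : 0 ≤ p.1 ∧ p.1 < 3) (h2 : 0 ≤ p.2.1 ∧ p.2.1 < 3)
    (h3 : 0 ≤ p.2.2.1 ∧ p.2.2.1 < 3) (h4 : 0 ≤ p.2.2.2 ∧ p.2.2.2 < 3) :
    pvCanon p = pvNormalize p := by
  obtain ⟨a, b, c, d⟩ := p
  dsimp only at h1 h2 h3 h4
  have ha : a = 0 ∨ a = 1 ∨ a = 2 := by omega
  have hb : b = 0 ∨ b = 1 ∨ b = 2 := by omega
  have hc : c = 0 ∨ c = 1 ∨ c = 2 := by omega
  have hd : d = 0 ∨ d = 1 ∨ d = 2 := by omega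
  rcases ha with rfl | rfl | rfl <;> rcases hb with rfl | rfl | rfl <;>
    rcases hc with rfl | rfl | rfl <;> rcases hd with rfl | rfl | rfl <;> decide

-- doubling a point does not change its line
theorem pv_normalize_double (p : Int × Int × Int × Int)
    (h1 : 0 ≤ p.1 ∧ p.1 < 3) (h2 : 0 ≤ p.2.1 ∧ p.2.1 < 3)
    (h3 : 0 ≤ p.2.2.1 ∧ p.2.2.1 < 3) (h4 : 0 ≤ p.2.2.2 ∧ p.2.2.2 < 3) :
    pvNormalize (pvDouble p) = pvNormalize p := by
  obtain ⟨a, b, c, d⟩ := p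
  dsimp only at h1 h2 h3 h4
  have ha : a = 0 ∨ a = 1 ∨ a = 2 := by omega
  have hb : b = 0 ∨ b = 1 ∨ b = 2 := by omega
  have hc : c = 0 ∨ c = 1 ∨ c = 2 := by omega
  have hd : d = 0 ∨ d = 1 ∨ d = 2 := by omega
  rcases ha with rfl | rfl | rfl <;> rcases hb with rfl | rfl | rfl <;>
    rcases hc with rfl | rfl | rfl <;> rcases hd with rfl | rfl | rfl <;> decide

-- the (2,b) / (0,2) grid points are the doubles of the four representatives
theorem pv_point_double (u v : Int × Int × Int × Int) (a b a' b' : Int)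
    (h : ∀ x y : Int, PySem.Int.mod (a * x + b * y) 3 = PySem.Int.mod (2 * (a' * x + b' * y)) 3) :
    pvPoint u v a b = pvDouble (pvPoint u v a' b') := by
  simp only [pvPoint, pvDouble, pv_md_twice]
  exact Prod.ext (h _ _) (Prod.ext (h _ _) (Prod.ext (h _ _) (h _ _)))

theorem pv_mod3_congr (x y : Int) (h : 3 ∣ (x - y)) :
    PySem.Int.mod x 3 = PySem.Int.mod y 3 := by
  rw [PySem.Int.mod_eq_emod_of_pos (by norm_num), PySem.Int.mod_eq_emod_of_pos (by norm_num)]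
  omega

-- ===== VERDICT (by name: the statement is the Claim_ definition above) =====
theorem get_2space_lines_spec : Claim_equal_get_2space_lines := by
  intro u v _
  unfold Spec_get_2space_lines
  have hbd : ∀ a b : Int,
      (0 ≤ (pvPoint u v a b).1 ∧ (pvPoint u v a b).1 < 3) ∧
      (0 ≤ (pvPoint u v a b).2.1 ∧ (pvPoint u v a b).2.1 < 3) ∧
      (0 ≤ (pvPoint u v a b).2.2.1 ∧ (pvPoint u v a b).2.2.1 < 3) ∧
      (0 ≤ (pvPoint u v a b).2.2.2 ∧ (pvPoint u v a b).2.2.2 < 3) := by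
    intro a b
    exact ⟨pv_md_bounds _, pv_md_bounds _, pv_md_bounds _, pv_md_bounds _⟩
  -- the four "double" grid points normalize to already-present lines
  have h02 : pvNormalize (pvPoint u v 0 2) = pvNormalize (pvPoint u v 0 1) := by
    rw [pv_point_double u v 0 2 0 1 (by intro x y; apply pv_mod3_congr; ring_nf; omega)]
    exact pv_normalize_double _ (hbd 0 1).1 (hbd 0 1).2.1 (hbd 0 1).2.2.1 (hbd 0 1).2.2.2
  have h20 : pvNormalize (pvPoint u v 2 0) = pvNormalize (pvPoint u v 1 0) := by
    rw [pv_point_double u v 2 0 1 0 (by intro x y; apply pv_mod3_congr; ring_nf; omega)]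
    exact pv_normalize_double _ (hbd 1 0).1 (hbd 1 0).2.1 (hbd 1 0).2.2.1 (hbd 1 0).2.2.2
  have h22 : pvNormalize (pvPoint u v 2 2) = pvNormalize (pvPoint u v 1 1) := by
    rw [pv_point_double u v 2 2 1 1 (by intro x y; apply pv_mod3_congr; ring_nf; omega)]
    exact pv_normalize_double _ (hbd 1 1).1 (hbd 1 1).2.1 (hbd 1 1).2.2.1 (hbd 1 1).2.2.2
  have h21 : pvNormalize (pvPoint u v 2 1) = pvNormalize (pvPoint u v 1 2) := by
    rw [pv_point_double u v 2 1 1 2 (by intro x y; apply pv_mod3_congr; ring_nf; omega)]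
    exact pv_normalize_double _ (hbd 1 2).1 (hbd 1 2).2.1 (hbd 1 2).2.2.1 (hbd 1 2).2.2.2
  have hc : ∀ a b : Int, pvCanon (pvPoint u v a b) = pvNormalize (pvPoint u v a b) := by
    intro a b
    exact pv_canon_eq_normalize _ (hbd a b).1 (hbd a b).2.1 (hbd a b).2.2.1 (hbd a b).2.2.2
  -- fold out A's nine grid cells and collapse the duplicate four
  have hadd : ∀ (s : List (Int × Int × Int × Int)) x,
      (if x ∈ s then s else s ++ [x]) = PySem.Set.add s x := by
    intro s x; simp [PySem.Set.add, PySem.Set.contains]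
  simp only [get_2space_lines, get_2space_lines_alt, pvGF3, List.foldl, hc, h02, h20, h22, h21, hadd]
  norm_num
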